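-- pv_equiv track=rewrite | github.com/devfoxaicn/content-forge-ai | src/agents/visualization_generator_agent.py | _find_sections_with_keywords
-- ===== SOURCE A (Python) =====
-- from typing import Dict, Any, List, Optional
--
-- def _find_sections_with_keywords(content: str, keywords: List[str]) -> List[str]:
--     """查找包含特定关键词的章节"""
--     sections = []
--     lines = content.split('\n')
--     current_section = []
--     current_section_title = ""
--
--     for line in lines:
--         # 检查是否是标题
--         if line.startswith('#'):
--             # 保存上一节
--             if current_section_title and current_section:
--                 section_text = '\n'.join(current_section)
--                 # 检查是否包含关键词
--                 if any(kw in section_text.lower() for kw in keywords):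
--                     sections.append(f"{current_section_title}\n{section_text[:500]}")
--
--             # 开始新节
--             current_section_title = line
--             current_section = []
--         else:
--             current_section.append(line)
--
--     # 检查最后一节
--     if current_section_title and current_section:
--         section_text = '\n'.join(current_section)
--         if any(kw in section_text.lower() for kw in keywords):
--             sections.append(f"{current_section_title}\n{section_text[:500]}")
--
--     return sections
-- ===== SOURCE B (Python) =====
-- from typing import List
--
-- def _find_sections_with_keywords(content: str, keywords: List[str]) -> List[str]:
--     # Single backward pass: walking the lines bottom-up, every '#' line meets
--     # exactly the body lines below it, so no pending-title state and no
--     # duplicated tail-flush are needed.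
--     out: List[str] = []
--     body: List[str] = []
--     for line in reversed(content.split('\n')):
--         if line.startswith('#'):
--             if body:
--                 text = '\n'.join(body)
--                 if any(kw in text.lower() for kw in keywords):
--                     out.append(f"{line}\n{text[:500]}")
--             body = []
--         else:
--             body = [line] + body
--     out.reverse()
--     return out
-- ===== Notes on version B (the rewrite author's own statement) =====
-- stated objective: alternative
-- what changed: B traverses the lines backwards in one pass: bottom-up, each '#' line meets exactly the body accumulated below it, so the pending-title state, the duplicated tail-flush and the dropped pre-header handling of A all disappear (sections are emitted in reverse and the output reversed once at the end).
import Mathlib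
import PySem

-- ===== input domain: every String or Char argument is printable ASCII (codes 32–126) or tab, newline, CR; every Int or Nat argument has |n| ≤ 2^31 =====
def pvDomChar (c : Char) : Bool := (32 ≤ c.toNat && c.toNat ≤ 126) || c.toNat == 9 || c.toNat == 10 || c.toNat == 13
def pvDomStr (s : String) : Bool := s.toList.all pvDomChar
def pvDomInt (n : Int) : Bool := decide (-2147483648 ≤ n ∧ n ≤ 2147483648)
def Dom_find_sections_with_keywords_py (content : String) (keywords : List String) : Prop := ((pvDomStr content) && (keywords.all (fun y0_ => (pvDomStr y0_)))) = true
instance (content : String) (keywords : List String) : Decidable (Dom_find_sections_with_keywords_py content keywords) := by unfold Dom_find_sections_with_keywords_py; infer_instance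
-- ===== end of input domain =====

-- B walks the lines BACKWARDS in a single pass: bottom-up each '#' line meets exactly
-- the body accumulated below it, so A's pending-title state and duplicated tail-flush
-- disappear; objective: alternative (same cost, different traversal order).

-- content.split('\n'): separator is nonempty, so CPython's str.split(sep) is PySem.Chars.splitOn; exact
def pvLines (content : String) : List String :=
  (PySem.Chars.splitOn content.toList ['\n']).map String.ofList

-- f"{title}\n{section_text[:500]}" (slice [:500] on a str of code points is take 500; exact)
def pvFmt (title text : String) : String :=
  String.ofList (title.toList ++ '\n' :: text.toList.take 500)

-- any(kw in section_text.lower() for kw in keywords)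
def pvMatch (keywords : List String) (text : String) : Bool :=
  keywords.any (fun kw => PySem.Str.isIn kw (PySem.Str.lower text))

-- ===== PORT A =====
-- the duplicated 'save the previous section' block of A (appears verbatim in the loop and after it)
def fsA_flush (keywords : List String) (title : String) (cur : List String)
    (sections : List String) : List String :=
  if title ≠ "" ∧ cur ≠ [] then
    let text := PySem.Str.join "\n" cur
    if pvMatch keywords text then sections ++ [pvFmt title text] else sections
  else sections

-- the for-loop over lines with state (sections, current_section, current_section_title)
def fsA_loop (keywords : List String) :
    List String → List String × List String × String → List String × List String × String
  | [], st => st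
  | line :: rest, (sections, cur, title) =>
    if PySem.Str.startswith line "#" then
      fsA_loop keywords rest (fsA_flush keywords title cur sections, [], line)
    else
      fsA_loop keywords rest (sections, cur ++ [line], title)

def find_sections_with_keywords_py (content : String) (keywords : List String) : List String :=
  let st := fsA_loop keywords (pvLines content) ([], [], "")
  fsA_flush keywords st.2.2 st.2.1 st.1

-- ===== PORT B =====
-- Source B's 'for line in reversed(content.split('\n'))' loop over state (out, body);
-- body = [line] + body is 'line :: body'
def fsB_loop (keywords : List String) :
    List String → List String × List String → List String × List String
  | [], st => st
  | line :: rest, (out, body) =>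
    if PySem.Str.startswith line "#" then
      fsB_loop keywords rest
        ((if body ≠ [] then
            let text := PySem.Str.join "\n" body
            if pvMatch keywords text then out ++ [pvFmt line text] else out
          else out), [])
    else
      fsB_loop keywords rest (out, line :: body)

def find_sections_with_keywords_py_alt (content : String) (keywords : List String) : List String :=
  (fsB_loop keywords (pvLines content).reverse ([], [])).1.reverse

-- ===== PRECONDITION & SPEC =====
def Spec_find_sections_with_keywords_py (content : String) (keywords : List String) (out : List String) : Prop := out = find_sections_with_keywords_py_alt content keywords
instance (content : String) (keywords : List String) (out : List String) : Decidable (Spec_find_sections_with_keywords_py content keywords out) := by unfold Spec_find_sections_with_keywords_py; infer_instance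

-- ===== CLAIM (what is proved, stated in full; the proofs are below) =====
def Claim_equal_find_sections_with_keywords_py : Prop := ∀ (content : String) (keywords : List String), Dom_find_sections_with_keywords_py content keywords → Spec_find_sections_with_keywords_py content keywords (find_sections_with_keywords_py content keywords)

-- ===== LEMMAS AND PROOFS =====
-- common spec: the (title, body) sections of a line list, plus its pre-header prefix
def secIf (title : String) (body : List String) : List (String × List String) :=
  if title ≠ "" ∧ body ≠ [] then [(title, body)] else []

def fsS : List String → List (String × List String) × List String
  | [] => ([], [])
  | l :: ls =>
    let r := fsS ls
    if PySem.Str.startswith l "#" then (secIf l r.2 ++ r.1, []) else (r.1, l :: r.2)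

def pvP (kw : List String) (sec : String × List String) : Bool :=
  pvMatch kw (PySem.Str.join "\n" sec.2)

def pvF (sec : String × List String) : String :=
  pvFmt sec.1 (PySem.Str.join "\n" sec.2)

theorem startswith_hash_ne_empty (l : String) (h : PySem.Str.startswith l "#" = true) :
    l ≠ "" := by
  intro he; subst he
  simp [PySem.Chars.startswith] at h

theorem fsA_flush_eq (kw : List String) (title : String) (cur acc : List String) :
    fsA_flush kw title cur acc = acc ++ ((secIf title cur).filter (pvP kw)).map pvF := by
  simp only [fsA_flush, secIf]
  split_ifs with h1 h2 <;> simp_all [pvP, pvF, List.filter]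

-- A's loop, characterized against fsS: pending (title, cur) absorbs the pre-header prefix
theorem fsA_main (kw : List String) (lines : List String) (acc cur : List String)
    (title : String) :
    fsA_flush kw (fsA_loop kw lines (acc, cur, title)).2.2
      (fsA_loop kw lines (acc, cur, title)).2.1 (fsA_loop kw lines (acc, cur, title)).1
    = acc ++ ((secIf title (cur ++ (fsS lines).2) ++ (fsS lines).1).filter (pvP kw)).map pvF := by
  induction lines generalizing acc cur title with
  | nil =>
    simp only [fsA_loop, fsS]
    rw [fsA_flush_eq]
    simp
  | cons line rest ih =>
    simp only [fsA_loop, fsS]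
    by_cases h : PySem.Str.startswith line "#" = true
    · rw [if_pos h, if_pos h, ih, fsA_flush_eq]
      simp [List.filter_append, List.append_assoc]
    · rw [if_neg h, if_neg h, ih]
      simp [List.append_assoc]

-- B's backward loop, characterized against fsS
theorem fsB_loop_append (kw : List String) (xs ys : List String)
    (st : List String × List String) :
    fsB_loop kw (xs ++ ys) st = fsB_loop kw ys (fsB_loop kw xs st) := by
  induction xs generalizing st with
  | nil => rfl
  | cons x xs ih =>
    obtain ⟨out, body⟩ := st
    simp only [List.cons_append, fsB_loop]
    by_cases h : PySem.Str.startswith x "#" = true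
    · rw [if_pos h, if_pos h]; exact ih _
    · rw [if_neg h, if_neg h]; exact ih _

theorem fsB_main (kw : List String) (lines : List String) :
    fsB_loop kw lines.reverse ([], [])
    = ((((fsS lines).1.filter (pvP kw)).map pvF).reverse, (fsS lines).2) := by
  induction lines with
  | nil => rfl
  | cons line rest ih =>
    rw [List.reverse_cons, fsB_loop_append, ih]
    simp only [fsB_loop, fsS]
    by_cases h : PySem.Str.startswith line "#" = true
    · rw [if_pos h, if_pos h]
      have hne := startswith_hash_ne_empty line h
      by_cases hb : (fsS rest).2 = []
      · simp [hb, secIf]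
      · rw [if_pos hb]
        by_cases hm : pvMatch kw (PySem.Str.join "\n" (fsS rest).2) = true
        · simp [secIf, hne, hb, pvP, pvF, hm]
        · simp [secIf, hne, hb, pvP, hm]
    · rw [if_neg h, if_neg h]

-- ===== VERDICT (by name: the statement is the Claim_ definition above) =====
theorem find_sections_with_keywords_py_spec : Claim_equal_find_sections_with_keywords_py := by
  intro content keywords _
  show find_sections_with_keywords_py content keywords = find_sections_with_keywords_py_alt content keywords
  unfold find_sections_with_keywords_py find_sections_with_keywords_py_alt
  rw [fsB_main]
  have h := fsA_main keywords (pvLines content) [] [] ""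
  simp only at h
  rw [h]
  simp [secIf]
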